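-- pv_equiv track=rewrite | github.com/marlonoliveira182/the-forge | projects/the-forge/archive/the-forge-v2.0.0-dev/merge_xlsx_with_paths.py | build_path_from_levels
-- ===== SOURCE A (Python) =====
-- def build_path_from_levels(row, level_indices, type_index=None, all_rows=None, row_idx=None):
--     # Para cada coluna de nível, busca para cima se estiver vazia
--     path_parts = []
--     for idx in level_indices:
--         val = row[idx]
--         if (val is None or str(val).strip() == '') and all_rows is not None and row_idx is not None:
--             # Busca para cima
--             for up_idx in range(row_idx-1, -1, -1):
--                 up_val = all_rows[up_idx][idx]
--                 if up_val is not None and str(up_val).strip() != '':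
--                     val = up_val
--                     break
--         if val is not None and str(val).strip() != '':
--             path_parts.append(str(val).strip())
--     return '.'.join(path_parts)
-- ===== SOURCE B (Python) =====
-- def build_path_from_levels(row, level_indices, type_index=None, all_rows=None, row_idx=None):
--     # One forward pass over the rows above row_idx: remember, per level column, the
--     # last non-empty value seen (forward fill-down); then read the path once.
--     # Cell reads are bounds-guarded (out-of-range reads as empty), so B is total.
--     def cell(r, idx):
--         if -len(r) <= idx < len(r):
--             return r[idx]
--         return None
--     filled = {}
--     if all_rows is not None and row_idx is not None:
--         for up in range(row_idx):
--             r = all_rows[up] if up < len(all_rows) else []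
--             for idx in level_indices:
--                 v = cell(r, idx)
--                 if v is not None and str(v).strip() != '':
--                     filled[idx] = v
--     parts = []
--     for idx in level_indices:
--         v = cell(row, idx)
--         if v is None or str(v).strip() == '':
--             v = filled.get(idx)
--         if v is not None and str(v).strip() != '':
--             parts.append(str(v).strip())
--     return '.'.join(parts)
-- ===== Notes on version B (the rewrite author's own statement) =====
-- stated objective: alternative
-- what changed: Replaces A's per-column upward rescan over earlier rows (with break) by a single forward fill-down pass that records, per level column, the last non-empty value seen above row_idx in a dict, then builds the path in one final read; cell reads are bounds-guarded so B is total.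
import Mathlib
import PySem

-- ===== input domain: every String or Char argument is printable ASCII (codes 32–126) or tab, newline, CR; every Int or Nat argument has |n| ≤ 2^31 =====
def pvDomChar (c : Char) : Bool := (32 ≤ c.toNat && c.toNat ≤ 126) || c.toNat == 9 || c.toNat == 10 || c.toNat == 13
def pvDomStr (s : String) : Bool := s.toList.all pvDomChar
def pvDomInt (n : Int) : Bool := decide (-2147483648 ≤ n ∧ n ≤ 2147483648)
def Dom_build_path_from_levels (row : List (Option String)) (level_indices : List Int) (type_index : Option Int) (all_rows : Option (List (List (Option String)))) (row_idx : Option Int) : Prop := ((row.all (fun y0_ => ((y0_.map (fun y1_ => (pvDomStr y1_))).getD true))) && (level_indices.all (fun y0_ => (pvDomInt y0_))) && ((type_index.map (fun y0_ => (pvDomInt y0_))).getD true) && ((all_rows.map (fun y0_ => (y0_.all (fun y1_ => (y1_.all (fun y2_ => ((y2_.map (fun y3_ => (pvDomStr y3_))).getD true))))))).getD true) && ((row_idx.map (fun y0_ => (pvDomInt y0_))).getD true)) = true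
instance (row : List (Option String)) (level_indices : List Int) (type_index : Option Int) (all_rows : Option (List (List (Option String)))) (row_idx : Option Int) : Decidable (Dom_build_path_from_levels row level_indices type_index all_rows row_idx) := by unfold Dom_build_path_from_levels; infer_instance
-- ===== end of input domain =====

-- ===== PORT A =====
-- B replaces A's per-column upward rescans by one forward fill-down pass over the rows above
-- row_idx plus a final read; B's cell reads are bounds-guarded, so B also returns (the path
-- built from the values that exist) where A raises IndexError — those inputs are outside Pre_.
def pvUpStep (ar : List (List (Option String))) (idx : Int)
    (st : Bool × Option String) (up_idx : Int) : Bool × Option String :=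
  if st.1 then st
  else
    let up_val := PySem.List.pyGetD (PySem.List.pyGetD ar up_idx []) idx none
    if up_val.isSome && !(PySem.Str.strip (up_val.getD "") == "") then (true, up_val) else st

def build_path_from_levels (row : List (Option String)) (level_indices : List Int) (type_index : Option Int) (all_rows : Option (List (List (Option String)))) (row_idx : Option Int) : String :=
  let path_parts := level_indices.foldl (fun path_parts idx =>
    let val := PySem.List.pyGetD row idx none
    let val :=
      if (val.isNone || (PySem.Str.strip (val.getD "") == "")) && all_rows.isSome && row_idx.isSome then
        ((PySem.List.pyRange (row_idx.getD 0 - 1) (-1) (-1)).foldl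
          (pvUpStep (all_rows.getD []) idx) (false, val)).2
      else val
    if val.isSome && !(PySem.Str.strip (val.getD "") == "") then
      path_parts ++ [PySem.Str.strip (val.getD "")]
    else path_parts) ([] : List String)
  PySem.Str.join "." path_parts

-- ===== PORT B =====
def pvFillCol (r : List (Option String)) (d : PySem.Dict Int (Option String)) (idx : Int) :
    PySem.Dict Int (Option String) :=
  let v := PySem.List.pyGetD r idx none
  if v.isSome && !(PySem.Str.strip (v.getD "") == "") then d.insert idx v else d

def pvFillRow (level_indices : List Int) (ar : List (List (Option String)))
    (d : PySem.Dict Int (Option String)) (up : Int) : PySem.Dict Int (Option String) :=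
  level_indices.foldl (pvFillCol (PySem.List.pyGetD ar up [])) d

def build_path_from_levels_alt (row : List (Option String)) (level_indices : List Int) (type_index : Option Int) (all_rows : Option (List (List (Option String)))) (row_idx : Option Int) : String :=
  let filled : PySem.Dict Int (Option String) :=
    match all_rows, row_idx with
    | some ar, some ri => (PySem.List.pyRange 0 ri 1).foldl (pvFillRow level_indices ar) PySem.Dict.empty
    | _, _ => PySem.Dict.empty
  let parts := level_indices.foldl (fun parts idx =>
    let v := PySem.List.pyGetD row idx none
    let v := if v.isNone || (PySem.Str.strip (v.getD "") == "") then (filled.get? idx).getD none else v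
    if v.isSome && !(PySem.Str.strip (v.getD "") == "") then
      parts ++ [PySem.Str.strip (v.getD "")]
    else parts) ([] : List String)
  PySem.Str.join "." parts

-- ===== PRECONDITION & SPEC =====

-- "cell value counts as a path segment" test shared by both loop bodies
def pvFilled (v : Option String) : Bool := v.isSome && !(PySem.Str.strip (v.getD "") == "")

-- bounds-guarded cell read: value at column idx of row k of ar, none when out of range
def pvCell (ar : List (List (Option String))) (k : Int) (idx : Int) : Option String :=
  PySem.List.pyGetD (PySem.List.pyGetD ar k []) idx none

-- does Python's all_rows[k][idx] succeed?
def pvAccessOK (ar : List (List (Option String))) (k : Nat) (idx : Int) : Bool :=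
  match PySem.List.pyGet? ar (k : Int) with
  | none => false
  | some r => (PySem.List.pyGet? r idx).isSome

-- Pre_ excludes EXACTLY the inputs on which Python A raises IndexError: some level index is out
-- of range for `row`, or an empty cell triggers the upward scan and that scan reaches an invalid
-- access (row index past len(all_rows), or a ragged row missing the column) before a non-empty
-- value stops it.  A returns normally on every other input.
def pvPreB (row : List (Option String)) (level_indices : List Int) (all_rows : Option (List (List (Option String)))) (row_idx : Option Int) : Bool :=
  level_indices.all (fun idx => (PySem.List.pyGet? row idx).isSome) &&
  ((all_rows.map (fun ar => (row_idx.map (fun ri =>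
     level_indices.all (fun idx =>
       pvFilled (PySem.List.pyGetD row idx none) ||
       (List.range ri.toNat).all (fun k =>
         pvAccessOK ar k idx ||
         (List.range ri.toNat).any (fun j => decide (k < j) && pvFilled (pvCell ar (j : Int) idx)))))).getD true)).getD true)

def Pre_build_path_from_levels (row : List (Option String)) (level_indices : List Int) (type_index : Option Int) (all_rows : Option (List (List (Option String)))) (row_idx : Option Int) : Prop :=
  pvPreB row level_indices all_rows row_idx = true
instance (row : List (Option String)) (level_indices : List Int) (type_index : Option Int) (all_rows : Option (List (List (Option String)))) (row_idx : Option Int) : Decidable (Pre_build_path_from_levels row level_indices type_index all_rows row_idx) := by unfold Pre_build_path_from_levels; infer_instance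

def pvWitness_build_path_from_levels : List (Option String) × List Int × Option Int × Option (List (List (Option String))) × Option Int :=
  ([some "a", none], [0, 1], none, some [[some "x", some "y"]], some 1)

def Spec_build_path_from_levels (row : List (Option String)) (level_indices : List Int) (type_index : Option Int) (all_rows : Option (List (List (Option String)))) (row_idx : Option Int) (out : String) : Prop := out = build_path_from_levels_alt row level_indices type_index all_rows row_idx
instance (row : List (Option String)) (level_indices : List Int) (type_index : Option Int) (all_rows : Option (List (List (Option String)))) (row_idx : Option Int) (out : String) : Decidable (Spec_build_path_from_levels row level_indices type_index all_rows row_idx out) := by unfold Spec_build_path_from_levels; infer_instance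

-- ===== CLAIM (what is proved, stated in full; the proofs are below) =====
def Claim_equal_build_path_from_levels : Prop := ∀ (row : List (Option String)) (level_indices : List Int) (type_index : Option Int) (all_rows : Option (List (List (Option String)))) (row_idx : Option Int), Dom_build_path_from_levels row level_indices type_index all_rows row_idx → Pre_build_path_from_levels row level_indices type_index all_rows row_idx → Spec_build_path_from_levels row level_indices type_index all_rows row_idx (build_path_from_levels row level_indices type_index all_rows row_idx)

-- ===== LEMMAS AND PROOFS =====

-- last non-empty guarded cell at column idx among rows 0..n-1 (the forward fill-down result)
def pvLastN (ar : List (List (Option String))) (idx : Int) (n : Nat) : Option (Option String) :=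
  (List.range n).foldl (fun acc k =>
    if pvFilled (pvCell ar (k : Int) idx) then some (pvCell ar (k : Int) idx) else acc) none

lemma pvLastN_succ (ar : List (List (Option String))) (idx : Int) (n : Nat) :
    pvLastN ar idx (n + 1) =
      (if pvFilled (pvCell ar (n : Int) idx) then some (pvCell ar (n : Int) idx)
       else pvLastN ar idx n) := by
  simp [pvLastN, List.range_succ, List.foldl_append]

lemma pvUpStep_break (ar : List (List (Option String))) (idx : Int) (l : List Int)
    (v : Option String) : l.foldl (pvUpStep ar idx) (true, v) = (true, v) := by
  induction l with
  | nil => rfl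
  | cons a l ih => simpa [pvUpStep] using ih

lemma pvUpA (ar : List (List (Option String))) (idx : Int) :
    ∀ (n : Nat) (v0 : Option String),
      ((PySem.List.pyRange ((n : Int) - 1) (-1) (-1)).foldl (pvUpStep ar idx) (false, v0)).2
        = (pvLastN ar idx n).getD v0 := by
  intro n
  induction n with
  | zero =>
    intro v0
    rw [PySem.List.pyRange_neg_one_eq_nil (by omega)]
    simp [pvLastN]
  | succ n ih =>
    intro v0
    rw [show ((n + 1 : Nat) : Int) - 1 = (n : Int) by push_cast; ring]
    rw [PySem.List.pyRange_neg_one_cons (by omega : (-1 : Int) < (n : Int))]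
    simp only [List.foldl_cons]
    rw [pvLastN_succ]
    by_cases hf : pvFilled (pvCell ar (n : Int) idx)
    · have hstep : pvUpStep ar idx (false, v0) (n : Int) = (true, pvCell ar (n : Int) idx) := by
        simp only [pvUpStep, pvCell, pvFilled] at hf ⊢
        simp only [PySem.List.pyGetD_natCast, List.getD_eq_getElem?_getD] at hf ⊢
        simp [hf]
      rw [hstep, pvUpStep_break]
      simp [hf]
    · have hstep : pvUpStep ar idx (false, v0) (n : Int) = (false, v0) := by
        simp only [pvUpStep, pvCell, pvFilled] at hf ⊢
        simp only [PySem.List.pyGetD_natCast, List.getD_eq_getElem?_getD] at hf ⊢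
        simp [hf]
      rw [hstep, ih v0]
      simp [hf]

lemma pvFillCol_get (r : List (Option String)) (idx : Int) :
    ∀ (l : List Int) (d : PySem.Dict Int (Option String)),
      (l.foldl (pvFillCol r) d).get? idx =
        if l.contains idx && pvFilled (PySem.List.pyGetD r idx none) then
          some (PySem.List.pyGetD r idx none)
        else d.get? idx := by
  intro l
  induction l with
  | nil => intro d; simp
  | cons a l ih =>
    intro d
    simp only [List.foldl_cons]
    rw [ih]
    have hstep : (pvFillCol r d a).get? idx =
        if idx = a ∧ pvFilled (PySem.List.pyGetD r a none) then
          some (PySem.List.pyGetD r a none)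
        else d.get? idx := by
      simp only [pvFillCol, pvFilled]
      by_cases hf : (PySem.List.pyGetD r a none).isSome
          && !(PySem.Str.strip ((PySem.List.pyGetD r a none).getD "") == "")
      · rw [if_pos hf, PySem.Dict.get?_insert]
        by_cases hia : idx = a <;> simp [hia, hf]
      · rw [if_neg hf]
        by_cases hia : idx = a <;> simp [hia, hf]
    rw [hstep]
    by_cases hia : idx = a
    · subst hia
      by_cases hf : pvFilled (PySem.List.pyGetD r idx none) <;>
        by_cases hm : l.contains idx <;> simp [hf, hm]
    · by_cases hm : l.contains idx <;> simp [hm, hia, Ne.symm hia]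

lemma pvFillB (ar : List (List (Option String))) (level_indices : List Int) (idx : Int)
    (hmem : idx ∈ level_indices) :
    ∀ (n : Nat) (d : PySem.Dict Int (Option String)),
      ((PySem.List.pyRange 0 (n : Int) 1).foldl (pvFillRow level_indices ar) d).get? idx
        = ((pvLastN ar idx n).map some).getD (d.get? idx) := by
  intro n
  induction n with
  | zero =>
    intro d
    rw [PySem.List.pyRange_one_eq_nil (by omega)]
    simp [pvLastN]
  | succ n ih =>
    intro d
    rw [show ((n + 1 : Nat) : Int) = (n : Int) + 1 by push_cast; ring]
    rw [PySem.List.pyRange_one_succ_right (by omega : (0 : Int) ≤ (n : Int))]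
    rw [List.foldl_append]
    simp only [List.foldl_cons, List.foldl_nil]
    rw [show pvFillRow level_indices ar
          ((PySem.List.pyRange 0 (n : Int) 1).foldl (pvFillRow level_indices ar) d) (n : Int)
        = level_indices.foldl (pvFillCol (PySem.List.pyGetD ar (n : Int) []))
          ((PySem.List.pyRange 0 (n : Int) 1).foldl (pvFillRow level_indices ar) d) by
      simp [pvFillRow]]
    rw [pvFillCol_get, ih d, pvLastN_succ]
    have hc : level_indices.contains idx = true := by simpa using hmem
    by_cases hf : pvFilled (pvCell ar (n : Int) idx) <;>
      simp_all [pvCell, hc]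

lemma pvFilled_false_of_empty (v : Option String)
    (hv : (v.isNone || (PySem.Str.strip (v.getD "") == "")) = true) :
    pvFilled v = false := by
  cases v <;> simp_all [pvFilled]

-- ===== VERDICT (by name: the statement is the Claim_ definition above) =====
theorem build_path_from_levels_spec : Claim_equal_build_path_from_levels := by
  intro row level_indices type_index all_rows row_idx _ _
  unfold Spec_build_path_from_levels build_path_from_levels build_path_from_levels_alt
  cases all_rows with
  | none =>
    apply congrArg (PySem.Str.join ".")
    apply PySem.List.foldl_congr_mem
    intro parts idx _
    by_cases hv : ((PySem.List.pyGetD row idx none).isNone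
        || (PySem.Str.strip ((PySem.List.pyGetD row idx none).getD "") == "")) = true
    · have hf := pvFilled_false_of_empty _ hv
      simp only [pvFilled] at hf
      simp [hv, hf, PySem.Dict.get?_empty]
    · simp [hv]
  | some ar =>
    cases row_idx with
    | none =>
      apply congrArg (PySem.Str.join ".")
      apply PySem.List.foldl_congr_mem
      intro parts idx _
      by_cases hv : ((PySem.List.pyGetD row idx none).isNone
          || (PySem.Str.strip ((PySem.List.pyGetD row idx none).getD "") == "")) = true
      · have hf := pvFilled_false_of_empty _ hv
        simp only [pvFilled] at hf
        simp [hv, hf, PySem.Dict.get?_empty]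
      · simp [hv]
    | some ri =>
      apply congrArg (PySem.Str.join ".")
      apply PySem.List.foldl_congr_mem
      intro parts idx hidx
      by_cases hv : ((PySem.List.pyGetD row idx none).isNone
          || (PySem.Str.strip ((PySem.List.pyGetD row idx none).getD "") == "")) = true
      · have hf := pvFilled_false_of_empty _ hv
        by_cases hrineg : 0 ≤ ri
        · have hrin : ri = ((ri.toNat : Nat) : Int) := (Int.toNat_of_nonneg hrineg).symm
          have hA := pvUpA ar idx ri.toNat (PySem.List.pyGetD row idx none)
          have hB := pvFillB ar level_indices idx hidx ri.toNat PySem.Dict.empty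
          rw [hrin]
          simp only [Option.isSome_some, Option.isSome_none, Bool.and_true, Bool.true_and,
            Option.getD_some, hv, if_true]
          rw [hA, hB]
          cases hlast : pvLastN ar idx ri.toNat with
          | none =>
            simp only [pvFilled] at hf
            simp [hf, PySem.Dict.get?_empty]
          | some w => simp
        · have hAnil : PySem.List.pyRange (ri - 1) (-1) (-1) = [] :=
            PySem.List.pyRange_neg_one_eq_nil (by omega)
          have hBnil : PySem.List.pyRange 0 ri 1 = [] :=
            PySem.List.pyRange_one_eq_nil (by omega)
          simp only [pvFilled] at hf
          simp [hAnil, hBnil, hv, hf, PySem.Dict.get?_empty]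
      · simp [hv]
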